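-- pv_equiv track=rewrite | github.com/levanin/CV-code | diff_checker.py | bracketing_helper
-- ===== SOURCE A (Python) =====
-- from collections import deque as queue
-- import copy
--
-- def lcs(s1, s2):
--     """Builds a 2d array where the values are the lengths of the longest common
--     substrings of the substrings of s1 and s2"""
--     n = len(s1)
--     m = len(s2)
--     # initialise 2d array with size n+1 x m+1
--     lcs_array = [[None for _ in range(m + 1)] for _ in range(n + 1)]
--     # build array of LCS counters
--     for i in range(n + 1):
--         for j in range(m + 1):
--             if i == 0 or j == 0:
--                 lcs_array[i][j] = 0
--             elif s1[i - 1] == s2[j - 1]: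
--                 lcs_array[i][j] = lcs_array[i - 1][j - 1] + 1
--             else:
--                 lcs_array[i][j] = max(lcs_array[i - 1][j], lcs_array[i][j - 1])
--     return lcs_array
--
-- def bracketing_helper(s1, s2):
--     """Adds double square brackets to s1 and s2 for any characters not
--      in the largest common sub-sequence of the two strings"""
--     lcs = queue(longest_common_substring(s1, s2))
--     lcs2 = copy.deepcopy(lcs)
--     s1_diff = ""
--     s2_diff = ""
--     for c in s1:
--         if len(lcs) > 0 and lcs[0] == c:
--             lcs.popleft()
--             s1_diff += c
--         else:
--             s1_diff += "[[" + c + "]]"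
--     for c in s2:
--         if len(lcs2) > 0 and lcs2[0] == c:
--             lcs2.popleft()
--             s2_diff += c
--         else:
--             s2_diff += "[[" + c + "]]"
--
--     return s1_diff, s2_diff
--
-- def longest_common_substring(s1, s2):
--     """Finds the longest common substring of 2 strings s1 and s2 using a bottom up DP approach"""
--     lcs_array = lcs(s1, s2)
--     n = len(s1)
--     m = len(s2)
--     l = lcs_array[n][m]
--     result = ""
--     while l != 0:
--         if s1[n - 1] == s2[m - 1]:
--             result = s1[n - 1] + result
--             l -= 1
--             n -= 1
--             m -= 1
--         elif lcs_array[n][m - 1] >= lcs_array[n - 1][m]: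
--             m -= 1
--         else:
--             n -= 1
--     return result
-- ===== SOURCE B (Python) =====
-- def bracketing_helper(s1, s2):
--     """Adds double square brackets to s1 and s2 for any characters not
--     in the largest common sub-sequence of the two strings.
--
--     Single forward DP whose cells carry (length, chain) where chain is a
--     shared (char, parent) linked chain of the chosen common subsequence --
--     no length table is kept and there is no traceback phase; then segment
--     based marking driven by the subsequence characters."""
--     m = len(s2)
--     prev = [(0, None)] * (m + 1)
--     for c1 in s1:
--         cur = [(0, None)]
--         for j, c2 in enumerate(s2):
--             if c1 == c2:
--                 ln, nd = prev[j]
--                 cur.append((ln + 1, (c1, nd)))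
--             else:
--                 left = cur[-1]
--                 up = prev[j + 1]
--                 cur.append(left if left[0] >= up[0] else up)
--         prev = cur
--     node = prev[m][1]
--     rev = []
--     while node is not None:
--         c, node = node
--         rev.append(c)
--     sub = ''.join(reversed(rev))
--
--     def mark(s):
--         parts = []
--         i = 0
--         for ch in sub:
--             j = i
--             while j < len(s) and s[j] != ch:
--                 parts.append('[[' + s[j] + ']]')
--                 j += 1
--             parts.append(ch)
--             i = j + 1
--         while i < len(s):
--             parts.append('[[' + s[i] + ']]')
--             i += 1
--         return ''.join(parts)
--
--     return mark(s1), mark(s2)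
-- ===== Notes on version B (the rewrite author's own statement) =====
-- stated objective: alternative
-- what changed: Replaces A's numeric LCS length table plus index-walking traceback by a single forward DP whose rolling row carries (length, shared linked chain of the subsequence itself), so the traceback phase disappears, and replaces the per-character deque-consuming bracketing loops with segment-based marking that scans to each subsequence character.
import Mathlib
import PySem

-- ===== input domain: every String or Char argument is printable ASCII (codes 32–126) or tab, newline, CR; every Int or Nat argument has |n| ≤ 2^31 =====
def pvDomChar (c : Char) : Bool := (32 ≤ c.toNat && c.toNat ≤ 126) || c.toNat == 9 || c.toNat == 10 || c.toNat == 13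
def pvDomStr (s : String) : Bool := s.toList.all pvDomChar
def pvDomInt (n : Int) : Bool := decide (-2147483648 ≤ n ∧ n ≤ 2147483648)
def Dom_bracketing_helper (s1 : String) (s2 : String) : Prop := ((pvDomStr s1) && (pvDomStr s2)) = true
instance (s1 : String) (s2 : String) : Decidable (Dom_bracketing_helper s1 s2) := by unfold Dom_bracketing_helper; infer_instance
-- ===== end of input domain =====

-- B replaces A's numeric LCS length table + index-walking traceback by ONE forward DP whose
-- rolling row stores (length, shared chain of the chosen subsequence itself) — no traceback
-- phase exists — and replaces the deque-consuming per-character bracketing loops by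
-- segment-based marking that scans ahead to each subsequence character (objective: alternative).

-- ===== PORT A =====

-- one cell of A's `lcs` table fill: reads lcs_array[i-1][j-1], [i-1][j], [i][j-1]
def pvCellA (l1 l2 : List Char) (rows : List (List Int)) (row : List Int) (i j : Nat) : Int :=
  if i = 0 ∨ j = 0 then 0
  else if l1[i - 1]? == l2[j - 1]? then (rows.getD (i - 1) []).getD (j - 1) 0 + 1
  else max ((rows.getD (i - 1) []).getD j 0) (row.getD (j - 1) 0)

-- A's `lcs`: the (n+1)×(m+1) table, built row-major (each cell written once, in order)
def pvLcsA (l1 l2 : List Char) : List (List Int) :=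
  (List.range (l1.length + 1)).foldl
    (fun rows i =>
      rows ++ [(List.range (l2.length + 1)).foldl
        (fun row j => row ++ [pvCellA l1 l2 rows row i j]) []])
    []

-- A's traceback `while l != 0` loop; fuel = n + m bounds the iteration count (each
-- reachable iteration decreases n + m).  Indices are in range in every reachable state
-- (proved below), so `pyGet?` is `some` and the `.getD ' '` default is never used.
def pvTbA (l1 l2 : List Char) (arr : List (List Int)) :
    Nat → Nat → Nat → Int → List Char → List Char
  | 0, _, _, _, res => res
  | fuel + 1, n, m, l, res =>
    if l = 0 then res
    else if PySem.List.pyGet? l1 ((n : Int) - 1) == PySem.List.pyGet? l2 ((m : Int) - 1) then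
      pvTbA l1 l2 arr fuel (n - 1) (m - 1) (l - 1)
        ((PySem.List.pyGet? l1 ((n : Int) - 1)).getD ' ' :: res)
    else if (arr.getD n []).getD (m - 1) 0 ≥ (arr.getD (n - 1) []).getD m 0 then
      pvTbA l1 l2 arr fuel n (m - 1) l res
    else
      pvTbA l1 l2 arr fuel (n - 1) m l res

-- A's `longest_common_substring`
def pvLongestCommonA (l1 l2 : List Char) : List Char :=
  let arr := pvLcsA l1 l2
  let n := l1.length
  let m := l2.length
  pvTbA l1 l2 arr (n + m) n m ((arr.getD n []).getD m 0) []

-- the `for c in s:` bracketing loop; the deque is the front of the list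
def pvMarkA (q : List Char) (s : List Char) : List Char × List Char :=
  s.foldl
    (fun st c =>
      if st.1.head? == some c then (st.1.tail, st.2 ++ [c])
      else (st.1, st.2 ++ ['[', '[', c, ']', ']']))
    (q, [])

def bracketing_helper (s1 : String) (s2 : String) : String × String :=
  let l1 := s1.toList
  let l2 := s2.toList
  let lcsq := pvLongestCommonA l1 l2
  (String.ofList (pvMarkA lcsq l1).2, String.ofList (pvMarkA lcsq l2).2)

-- ===== PORT B =====

-- one cell of B's forward DP: a pair (length, chain); the chain (Python's nested
-- (char, parent) tuples, None = []) is the chosen common subsequence, reversed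
def pvCellB (prev cur : List (Int × List Char)) (c1 : Char) (j : Int) (c2 : Char) :
    Int × List Char :=
  if c1 = c2 then
    let p := PySem.List.pyGetD prev j ((0 : Int), ([] : List Char))   -- prev[j]
    (p.1 + 1, c1 :: p.2)
  else
    let left := PySem.List.pyGetD cur (-1) ((0 : Int), ([] : List Char))       -- cur[-1]
    let up := PySem.List.pyGetD prev (j + 1) ((0 : Int), ([] : List Char))     -- prev[j+1]
    if left.1 ≥ up.1 then left else up

-- B's inner `for j, c2 in enumerate(s2):` loop
def pvRowB (prev : List (Int × List Char)) (c1 : Char) (l2 : List Char) :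
    List (Int × List Char) :=
  (PySem.List.enumerate l2 0).foldl
    (fun cur jc => cur ++ [pvCellB prev cur c1 jc.1 jc.2]) [((0 : Int), ([] : List Char))]

-- B's outer `for c1 in s1:` loop over the rolling row
def pvDPB (l1 l2 : List Char) : List (Int × List Char) :=
  l1.foldl (fun prev c1 => pvRowB prev c1 l2)
    (List.replicate (l2.length + 1) ((0 : Int), ([] : List Char)))

-- B's `mark`: outer loop over the subsequence characters; the inner `while` scan and the
-- cursor i correspond to recursing on the not-yet-consumed suffix of s
def pvMarkSeg : List Char → List Char → List Char
  | [], s => s.flatMap (fun c => ['[', '[', c, ']', ']'])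
  | ch :: sub, [] => ch :: pvMarkSeg sub []     -- scan ran off the end (unreachable here)
  | ch :: sub, c :: s =>
    if c = ch then ch :: pvMarkSeg sub s
    else '[' :: '[' :: c :: ']' :: ']' :: pvMarkSeg (ch :: sub) s
  termination_by sub s => (sub.length, s.length)

def bracketing_helper_alt (s1 : String) (s2 : String) : String × String :=
  let l1 := s1.toList
  let l2 := s2.toList
  let node := (PySem.List.pyGetD (pvDPB l1 l2) (l2.length : Int)
    ((0 : Int), ([] : List Char))).2                       -- prev[m][1]
  -- the `while node` unwind copies the chain into `rev`; on the list representation of the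
  -- chain that list is `node` itself, and ''.join(reversed(rev)) is its reverse
  let sub := node.reverse
  (String.ofList (pvMarkSeg sub l1), String.ofList (pvMarkSeg sub l2))

-- ===== PRECONDITION & SPEC =====
def Spec_bracketing_helper (s1 : String) (s2 : String) (out : String × String) : Prop := out = bracketing_helper_alt s1 s2
instance (s1 : String) (s2 : String) (out : String × String) : Decidable (Spec_bracketing_helper s1 s2 out) := by unfold Spec_bracketing_helper; infer_instance

-- ===== CLAIM (what is proved, stated in full; the proofs are below) =====
def Claim_equal_bracketing_helper : Prop := ∀ (s1 : String) (s2 : String), Dom_bracketing_helper s1 s2 → Spec_bracketing_helper s1 s2 (bracketing_helper s1 s2)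

-- ===== LEMMAS AND PROOFS =====

-- the LCS-length function A's table tabulates
def pvL (l1 l2 : List Char) : Nat → Nat → Int
  | 0, _ => 0
  | _ + 1, 0 => 0
  | i + 1, j + 1 =>
    if l1[i]? == l2[j]? then pvL l1 l2 i j + 1
    else max (pvL l1 l2 i (j + 1)) (pvL l1 l2 (i + 1) j)
  termination_by i j => i + j

theorem pvL_zero_left (l1 l2 : List Char) (j : Nat) : pvL l1 l2 0 j = 0 := by simp [pvL]

theorem pvL_zero_right (l1 l2 : List Char) (i : Nat) : pvL l1 l2 i 0 = 0 := by
  cases i <;> simp [pvL]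

theorem pvL_succ (l1 l2 : List Char) (i j : Nat) :
    pvL l1 l2 (i + 1) (j + 1) =
      if l1[i]? == l2[j]? then pvL l1 l2 i j + 1
      else max (pvL l1 l2 i (j + 1)) (pvL l1 l2 (i + 1) j) := by
  rw [pvL]

-- the common subsequence B's cells carry, stored reversed (cons-built chain)
def pvG (l1 l2 : List Char) : Nat → Nat → List Char
  | 0, _ => []
  | _ + 1, 0 => []
  | i + 1, j + 1 =>
    if l1[i]? == l2[j]? then l1[i]?.getD ' ' :: pvG l1 l2 i j
    else if (pvG l1 l2 (i + 1) j).length ≥ (pvG l1 l2 i (j + 1)).length then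
      pvG l1 l2 (i + 1) j
    else pvG l1 l2 i (j + 1)
  termination_by i j => i + j

theorem pvG_zero_left (l1 l2 : List Char) (j : Nat) : pvG l1 l2 0 j = [] := by simp [pvG]

theorem pvG_zero_right (l1 l2 : List Char) (i : Nat) : pvG l1 l2 i 0 = [] := by
  cases i <;> simp [pvG]

theorem pvG_succ (l1 l2 : List Char) (i j : Nat) :
    pvG l1 l2 (i + 1) (j + 1) =
      if l1[i]? == l2[j]? then l1[i]?.getD ' ' :: pvG l1 l2 i j
      else if (pvG l1 l2 (i + 1) j).length ≥ (pvG l1 l2 i (j + 1)).length then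
        pvG l1 l2 (i + 1) j
      else pvG l1 l2 i (j + 1) := by
  rw [pvG]

theorem pvL_ne_zero (l1 l2 : List Char) (i j : Nat) (h : pvL l1 l2 i j ≠ 0) :
    1 ≤ i ∧ 1 ≤ j := by
  constructor
  · by_contra hi
    exact h (by simp [Nat.lt_one_iff.mp (by omega : i < 1), pvL_zero_left])
  · by_contra hj
    exact h (by simp [Nat.lt_one_iff.mp (by omega : j < 1), pvL_zero_right])

theorem pvGetD_map_range {α : Type} (f : Nat → α) (n k : Nat) (d : α) (h : k < n) :
    ((List.range n).map f).getD k d = f k := by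
  rw [List.getD_eq_getElem _ _ (by simpa using h)]
  simp

theorem pvPyGet_pred {α : Type} (l : List α) (i : Nat) (h : 1 ≤ i) :
    PySem.List.pyGet? l ((i : Int) - 1) = l[i - 1]? := by
  have : ((i : Int) - 1) = ((i - 1 : Nat) : Int) := by omega
  rw [this, PySem.List.pyGet?_natCast]

-- ===== A-side: the row-major table computes pvL =====

theorem pvRowA_eq (l1 l2 : List Char) (rows : List (List Int)) (i : Nat)
    (hprev : ∀ j ≤ l2.length, (rows.getD (i - 1) []).getD j 0 = pvL l1 l2 (i - 1) j) :
    ∀ J, J ≤ l2.length + 1 →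
      (List.range J).foldl (fun row j => row ++ [pvCellA l1 l2 rows row i j]) [] =
        (List.range J).map (pvL l1 l2 i) := by
  intro J
  induction J with
  | zero => simp
  | succ J ih =>
    intro hJ
    rw [List.range_succ, List.foldl_append, List.map_append, ih (by omega)]
    simp only [List.foldl_cons, List.foldl_nil, List.map_cons, List.map_nil]
    have hcell : pvCellA l1 l2 rows ((List.range J).map (pvL l1 l2 i)) i J = pvL l1 l2 i J := by
      unfold pvCellA
      by_cases h0 : i = 0 ∨ J = 0
      · rcases h0 with h0 | h0 <;> simp [h0, pvL_zero_left, pvL_zero_right]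
      · simp only [not_or] at h0
        obtain ⟨i', rfl⟩ : ∃ i', i = i' + 1 := ⟨i - 1, by omega⟩
        obtain ⟨J', rfl⟩ : ∃ J', J = J' + 1 := ⟨J - 1, by omega⟩
        rw [if_neg (by simp), pvL_succ]
        simp only [Nat.add_sub_cancel] at hprev ⊢
        rw [hprev J' (by omega), hprev (J' + 1) (by omega),
          pvGetD_map_range _ _ _ _ (by omega : J' < J' + 1)]
    rw [hcell]

theorem pvLcsA_eq (l1 l2 : List Char) :
    ∀ I, I ≤ l1.length + 1 →
      (List.range I).foldl
        (fun rows i =>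
          rows ++ [(List.range (l2.length + 1)).foldl
            (fun row j => row ++ [pvCellA l1 l2 rows row i j]) []]) [] =
        (List.range I).map (fun i => (List.range (l2.length + 1)).map (pvL l1 l2 i)) := by
  intro I
  induction I with
  | zero => simp
  | succ I ih =>
    intro hI
    rw [show List.range (I + 1) = List.range I ++ [I] from List.range_succ,
      List.foldl_append, List.map_append, ih (by omega)]
    simp only [List.foldl_cons, List.foldl_nil, List.map_cons, List.map_nil]
    congr 2
    apply pvRowA_eq
    · intro j hj
      cases I with
      | zero => simp [pvL_zero_left]
      | succ I' =>
        simp only [Nat.add_sub_cancel]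
        rw [pvGetD_map_range _ _ _ _ (by omega : I' < I' + 1),
          pvGetD_map_range _ _ _ _ (by omega : j < l2.length + 1)]
    · exact le_rfl

theorem pvLcsA_correct (l1 l2 : List Char) (i j : Nat)
    (hi : i ≤ l1.length) (hj : j ≤ l2.length) :
    ((pvLcsA l1 l2).getD i []).getD j 0 = pvL l1 l2 i j := by
  unfold pvLcsA
  rw [pvLcsA_eq l1 l2 (l1.length + 1) le_rfl,
    pvGetD_map_range _ _ _ _ (by omega : i < l1.length + 1),
    pvGetD_map_range _ _ _ _ (by omega : j < l2.length + 1)]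

-- ===== pvG's length is pvL =====

theorem pvG_length_aux (l1 l2 : List Char) :
    ∀ (k i j : Nat), i + j ≤ k → ((pvG l1 l2 i j).length : Int) = pvL l1 l2 i j := by
  intro k
  induction k with
  | zero =>
    intro i j h
    obtain ⟨rfl, rfl⟩ : i = 0 ∧ j = 0 := by omega
    simp [pvG_zero_left, pvL_zero_left]
  | succ k ih =>
    intro i j h
    match i, j with
    | 0, j => simp [pvG_zero_left, pvL_zero_left]
    | i + 1, 0 => simp [pvG_zero_right, pvL_zero_right]
    | i + 1, j + 1 =>
      rw [pvG_succ, pvL_succ]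
      by_cases hc : (l1[i]? == l2[j]?) = true
      · rw [if_pos hc, if_pos hc]
        have := ih i j (by omega)
        simp only [List.length_cons]
        push_cast
        omega
      · rw [if_neg hc, if_neg hc]
        have h1 := ih (i + 1) j (by omega)
        have h2 := ih i (j + 1) (by omega)
        by_cases hge : (pvG l1 l2 (i + 1) j).length ≥ (pvG l1 l2 i (j + 1)).length
        · rw [if_pos hge]; omega
        · rw [if_neg hge]; omega

theorem pvG_length (l1 l2 : List Char) (i j : Nat) :
    ((pvG l1 l2 i j).length : Int) = pvL l1 l2 i j :=
  pvG_length_aux l1 l2 (i + j) i j le_rfl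

theorem pvG_nil (l1 l2 : List Char) (i j : Nat) (h : pvL l1 l2 i j = 0) :
    pvG l1 l2 i j = [] := by
  have := pvG_length l1 l2 i j
  rw [h] at this
  exact List.length_eq_zero_iff.mp (by omega)

-- ===== B-side: the rolling row computes (pvL, pvG) =====

theorem pvCellB_eq (l1 l2 : List Char) (i J : Nat) (c1 : Char)
    (hc1 : l1[i]? = some c1) (hJ : J < l2.length) :
    pvCellB ((List.range (l2.length + 1)).map fun j => (pvL l1 l2 i j, pvG l1 l2 i j))
            ((List.range (J + 1)).map fun j => (pvL l1 l2 (i + 1) j, pvG l1 l2 (i + 1) j))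
            c1 (J : Int) l2[J]
      = (pvL l1 l2 (i + 1) (J + 1), pvG l1 l2 (i + 1) (J + 1)) := by
  have hj2 : l2[J]? = some l2[J] := List.getElem?_eq_getElem hJ
  unfold pvCellB
  by_cases hc : c1 = l2[J]
  · rw [if_pos hc]
    have hbeq : (l1[i]? == l2[J]?) = true := by simp [hc1, hj2, hc]
    rw [PySem.List.pyGetD_natCast, pvGetD_map_range _ _ _ _ (by omega : J < l2.length + 1)]
    rw [pvL_succ, if_pos hbeq, pvG_succ, if_pos hbeq, hc1]
    simp
  · have hbeq : (l1[i]? == l2[J]?) = false := by simp [hc1, hj2, hc]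
    rw [if_neg hc]
    have hleft : PySem.List.pyGetD
        ((List.range (J + 1)).map fun j => (pvL l1 l2 (i + 1) j, pvG l1 l2 (i + 1) j))
        (-1) ((0 : Int), ([] : List Char)) = (pvL l1 l2 (i + 1) J, pvG l1 l2 (i + 1) J) := by
      rw [List.range_succ, List.map_append]
      exact PySem.List.pyGetD_neg_one_append_singleton _ _ _
    have hup : ((J : Int) + 1) = ((J + 1 : Nat) : Int) := by omega
    rw [hleft, hup, PySem.List.pyGetD_natCast,
      pvGetD_map_range _ _ _ _ (by omega : J + 1 < l2.length + 1)]
    simp only [pvL_succ, pvG_succ, hbeq, Bool.false_eq_true, if_false]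
    have h1 := pvG_length l1 l2 (i + 1) J
    have h2 := pvG_length l1 l2 i (J + 1)
    by_cases hge : (pvG l1 l2 (i + 1) J).length ≥ (pvG l1 l2 i (J + 1)).length
    · rw [if_pos (by omega : pvL l1 l2 (i + 1) J ≥ pvL l1 l2 i (J + 1)), if_pos hge]
      refine Prod.ext ?_ rfl
      simp only
      omega
    · rw [if_neg (by omega : ¬ pvL l1 l2 (i + 1) J ≥ pvL l1 l2 i (J + 1)), if_neg hge]
      refine Prod.ext ?_ rfl
      simp only
      omega

theorem pvRowB_take (l1 l2 : List Char) (i : Nat) (c1 : Char) (hc1 : l1[i]? = some c1) :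
    ∀ J, J ≤ l2.length →
      (PySem.List.enumerate (l2.take J) 0).foldl
        (fun cur jc =>
          cur ++ [pvCellB ((List.range (l2.length + 1)).map
            fun j => (pvL l1 l2 i j, pvG l1 l2 i j)) cur c1 jc.1 jc.2])
        [((0 : Int), ([] : List Char))]
      = (List.range (J + 1)).map (fun j => (pvL l1 l2 (i + 1) j, pvG l1 l2 (i + 1) j)) := by
  intro J
  induction J with
  | zero =>
    intro _
    simp [PySem.List.enumerate_nil, List.range_succ, pvL_zero_right, pvG_zero_right]
  | succ J ih =>
    intro hJ
    have hJlt : J < l2.length := by omega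
    have htake : l2.take (J + 1) = l2.take J ++ [l2[J]] := by
      rw [List.take_add_one, List.getElem?_eq_getElem hJlt]
      rfl
    rw [htake, PySem.List.enumerate_append, List.foldl_append]
    have hlen : ((l2.take J).length : Int) = (J : Int) := by
      simp [List.length_take, Nat.min_eq_left (by omega : J ≤ l2.length)]
    rw [ih (by omega)]
    simp only [PySem.List.enumerate_cons, PySem.List.enumerate_nil, List.foldl_cons,
      List.foldl_nil, hlen, zero_add]
    rw [pvCellB_eq l1 l2 i J c1 hc1 hJlt]
    rw [show List.range (J + 1 + 1) = List.range (J + 1) ++ [J + 1] from List.range_succ,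
      List.map_append]
    rfl

theorem pvDPB_take (l1 l2 : List Char) :
    ∀ i ≤ l1.length,
      (l1.take i).foldl (fun prev c1 => pvRowB prev c1 l2)
        (List.replicate (l2.length + 1) ((0 : Int), ([] : List Char)))
      = (List.range (l2.length + 1)).map (fun j => (pvL l1 l2 i j, pvG l1 l2 i j)) := by
  intro i
  induction i with
  | zero =>
    intro _
    simp only [List.take_zero, List.foldl_nil]
    apply List.ext_getElem
    · simp
    · intro k h1 h2
      simp [pvL_zero_left, pvG_zero_left]
  | succ i ih =>
    intro hi
    have hlt : i < l1.length := by omega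
    have htake : l1.take (i + 1) = l1.take i ++ [l1[i]] := by
      rw [List.take_add_one, List.getElem?_eq_getElem hlt]
      rfl
    rw [htake, List.foldl_append, ih (by omega)]
    simp only [List.foldl_cons, List.foldl_nil]
    unfold pvRowB
    have h := pvRowB_take l1 l2 i l1[i] (List.getElem?_eq_getElem hlt) l2.length le_rfl
    rw [List.take_length] at h
    exact h

-- ===== A's traceback produces pvG reversed =====

theorem pvTbA_pvG (l1 l2 : List Char) :
    ∀ (fuel i j : Nat) (res : List Char), i + j ≤ fuel → i ≤ l1.length → j ≤ l2.length →
      pvTbA l1 l2 (pvLcsA l1 l2) fuel i j (pvL l1 l2 i j) res =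
        (pvG l1 l2 i j).reverse ++ res := by
  intro fuel
  induction fuel with
  | zero =>
    intro i j res hf _ _
    obtain ⟨rfl, rfl⟩ : i = 0 ∧ j = 0 := by omega
    simp [pvTbA, pvG_zero_left]
  | succ fuel ih =>
    intro i j res hf hi hj
    rw [pvTbA]
    by_cases hl : pvL l1 l2 i j = 0
    · rw [if_pos hl, pvG_nil l1 l2 i j hl]
      simp
    · rw [if_neg hl]
      obtain ⟨h1, h2⟩ := pvL_ne_zero l1 l2 i j hl
      obtain ⟨i', rfl⟩ : ∃ i', i = i' + 1 := ⟨i - 1, by omega⟩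
      obtain ⟨j', rfl⟩ : ∃ j', j = j' + 1 := ⟨j - 1, by omega⟩
      rw [pvPyGet_pred l1 (i' + 1) (by omega), pvPyGet_pred l2 (j' + 1) (by omega)]
      simp only [Nat.add_sub_cancel]
      by_cases hc : (l1[i']? == l2[j']?) = true
      · rw [if_pos hc]
        have hrec : pvL l1 l2 (i' + 1) (j' + 1) - 1 = pvL l1 l2 i' j' := by
          rw [pvL_succ, if_pos hc]; ring
        rw [hrec, ih i' j' _ (by omega) (by omega) (by omega)]
        rw [pvG_succ, if_pos hc]
        simp
      · rw [if_neg hc]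
        rw [pvLcsA_correct l1 l2 (i' + 1) j' hi (by omega),
          pvLcsA_correct l1 l2 i' (j' + 1) (by omega) hj]
        have hmm : pvL l1 l2 (i' + 1) (j' + 1) =
            max (pvL l1 l2 i' (j' + 1)) (pvL l1 l2 (i' + 1) j') := by
          rw [pvL_succ, if_neg (by simp [Bool.eq_false_iff.mpr hc])]
        have hg1 := pvG_length l1 l2 (i' + 1) j'
        have hg2 := pvG_length l1 l2 i' (j' + 1)
        have hcf : (l1[i']? == l2[j']?) = false := by simpa using hc
        simp only [pvG_succ, hcf, Bool.false_eq_true, if_false]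
        by_cases hge : pvL l1 l2 (i' + 1) j' ≥ pvL l1 l2 i' (j' + 1)
        · rw [if_pos hge,
            if_pos (by omega : (pvG l1 l2 (i' + 1) j').length ≥ (pvG l1 l2 i' (j' + 1)).length)]
          have : pvL l1 l2 (i' + 1) (j' + 1) = pvL l1 l2 (i' + 1) j' := by omega
          rw [this, ih (i' + 1) j' res (by omega) hi (by omega)]
        · rw [if_neg hge,
            if_neg (by omega : ¬ (pvG l1 l2 (i' + 1) j').length ≥ (pvG l1 l2 i' (j' + 1)).length)]
          have : pvL l1 l2 (i' + 1) (j' + 1) = pvL l1 l2 i' (j' + 1) := by omega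
          rw [this, ih i' (j' + 1) res (by omega) (by omega) hj]

-- ===== pvG reversed is a common subsequence =====

theorem pvG_sublist_aux (l1 l2 : List Char) :
    ∀ (k i j : Nat), i + j ≤ k → i ≤ l1.length → j ≤ l2.length →
      List.Sublist (pvG l1 l2 i j).reverse (l1.take i) ∧ List.Sublist (pvG l1 l2 i j).reverse (l2.take j) := by
  intro k
  induction k with
  | zero =>
    intro i j h _ _
    obtain ⟨rfl, rfl⟩ : i = 0 ∧ j = 0 := by omega
    simp [pvG_zero_left]
  | succ k ih =>
    intro i j h hi hj
    match i, j with
    | 0, j => simp [pvG_zero_left]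
    | i + 1, 0 => simp [pvG_zero_right]
    | i + 1, j + 1 =>
      have hilt : i < l1.length := by omega
      have hjlt : j < l2.length := by omega
      have htake1 : l1.take (i + 1) = l1.take i ++ [l1[i]] := by
        rw [List.take_add_one, List.getElem?_eq_getElem hilt]; rfl
      have htake2 : l2.take (j + 1) = l2.take j ++ [l2[j]] := by
        rw [List.take_add_one, List.getElem?_eq_getElem hjlt]; rfl
      have hmono1 : List.Sublist (l1.take i) (l1.take (i + 1)) := by
        rw [htake1]; exact (List.sublist_append_left _ _)
      have hmono2 : List.Sublist (l2.take j) (l2.take (j + 1)) := by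
        rw [htake2]; exact (List.sublist_append_left _ _)
      rw [pvG_succ]
      by_cases hc : (l1[i]? == l2[j]?) = true
      · rw [if_pos hc]
        have hchars : l1[i] = l2[j] := by
          have e1 : l1[i]? = some l1[i] := List.getElem?_eq_getElem hilt
          have e2 : l2[j]? = some l2[j] := List.getElem?_eq_getElem hjlt
          rw [e1, e2] at hc
          simpa using hc
        obtain ⟨s1, s2⟩ := ih i j (by omega) (by omega) (by omega)
        have hgd : l1[i]?.getD ' ' = l1[i] := by
          rw [List.getElem?_eq_getElem hilt]; rfl
        constructor
        · rw [List.reverse_cons, hgd, htake1]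
          exact s1.append (List.Sublist.refl _)
        · rw [List.reverse_cons, hgd, hchars, htake2]
          exact s2.append (List.Sublist.refl _)
      · rw [if_neg hc]
        by_cases hge : (pvG l1 l2 (i + 1) j).length ≥ (pvG l1 l2 i (j + 1)).length
        · rw [if_pos hge]
          obtain ⟨s1, s2⟩ := ih (i + 1) j (by omega) hi (by omega)
          exact ⟨s1, s2.trans hmono2⟩
        · rw [if_neg hge]
          obtain ⟨s1, s2⟩ := ih i (j + 1) (by omega) (by omega) hj
          exact ⟨s1.trans hmono1, s2⟩

-- ===== bracketing: A's deque fold equals B's segment marking on a subsequence =====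

-- A's fold as a recursion on s
def pvMarkRec : List Char → List Char → List Char
  | _, [] => []
  | q, c :: s =>
    if q.head? == some c then c :: pvMarkRec q.tail s
    else '[' :: '[' :: c :: ']' :: ']' :: pvMarkRec q s

theorem pvMarkA_rec (s : List Char) :
    ∀ (q acc : List Char),
      (s.foldl
        (fun st c =>
          if st.1.head? == some c then (st.1.tail, st.2 ++ [c])
          else (st.1, st.2 ++ ['[', '[', c, ']', ']']))
        (q, acc)).2 = acc ++ pvMarkRec q s := by
  induction s with
  | nil => intro q acc; simp [pvMarkRec]
  | cons c s ih =>
    intro q acc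
    simp only [List.foldl_cons, pvMarkRec]
    by_cases hc : (q.head? == some c) = true
    · rw [if_pos hc, if_pos hc, ih]
      simp
    · rw [if_neg hc, if_neg hc, ih]
      simp

theorem pvMarkRec_seg (s : List Char) :
    ∀ sub : List Char, List.Sublist sub s → pvMarkRec sub s = pvMarkSeg sub s := by
  induction s with
  | nil =>
    intro sub hsub
    rw [List.sublist_nil.mp hsub]
    simp [pvMarkRec, pvMarkSeg]
  | cons c s ih =>
    intro sub hsub
    match sub with
    | [] =>
      rw [pvMarkRec, pvMarkSeg]
      simp only [List.head?_nil, List.flatMap_cons]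
      rw [if_neg (by simp), ih [] (List.nil_sublist s), pvMarkSeg]
      rfl
    | ch :: sub' =>
      rw [pvMarkRec, pvMarkSeg]
      by_cases hch : c = ch
      · rw [if_pos hch, if_pos (by simp [hch])]
        have hsub' : List.Sublist sub' s := by
          cases hsub with
          | cons _ h => exact ((List.sublist_cons_self ch sub').trans h)
          | cons₂ _ h => exact h
        simp only [List.tail_cons]
        rw [ih sub' hsub', hch]
      · rw [if_neg hch, if_neg (by simp [Ne.symm hch])]
        have hsub' : List.Sublist (ch :: sub') s := by
          cases hsub with
          | cons _ h => exact h
          | cons₂ _ h => exact absurd rfl hch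
        rw [ih (ch :: sub') hsub']

-- ===== assembly =====

theorem pvSub_eq (l1 l2 : List Char) :
    ((PySem.List.pyGetD (pvDPB l1 l2) (l2.length : Int)
        ((0 : Int), ([] : List Char))).2).reverse = pvLongestCommonA l1 l2 := by
  unfold pvDPB
  rw [show l1 = l1.take l1.length from (List.take_length (l := l1)).symm]
  rw [pvDPB_take l1 l2 l1.length le_rfl]
  simp only [List.take_length]
  rw [PySem.List.pyGetD_natCast,
    pvGetD_map_range _ _ _ _ (by omega : l2.length < l2.length + 1)]
  unfold pvLongestCommonA
  dsimp only
  rw [pvLcsA_correct l1 l2 l1.length l2.length le_rfl le_rfl,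
    pvTbA_pvG l1 l2 (l1.length + l2.length) l1.length l2.length [] le_rfl le_rfl le_rfl]
  simp

-- ===== VERDICT (by name: the statement is the Claim_ definition above) =====
theorem bracketing_helper_spec : Claim_equal_bracketing_helper := by
  intro s1 s2 _
  unfold Spec_bracketing_helper bracketing_helper bracketing_helper_alt
  simp only []
  rw [pvSub_eq s1.toList s2.toList]
  obtain ⟨h11, h12⟩ := pvG_sublist_aux s1.toList s2.toList
    (s1.toList.length + s2.toList.length) s1.toList.length s2.toList.length
    le_rfl le_rfl le_rfl
  have hG : pvLongestCommonA s1.toList s2.toList =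
      (pvG s1.toList s2.toList s1.toList.length s2.toList.length).reverse := by
    unfold pvLongestCommonA
    dsimp only
    rw [pvLcsA_correct s1.toList s2.toList s1.toList.length s2.toList.length le_rfl le_rfl,
      pvTbA_pvG s1.toList s2.toList (s1.toList.length + s2.toList.length)
        s1.toList.length s2.toList.length [] le_rfl le_rfl le_rfl]
    simp
  rw [List.take_length] at h11 h12
  have e1 : (pvMarkA (pvLongestCommonA s1.toList s2.toList) s1.toList).2 =
      pvMarkSeg (pvLongestCommonA s1.toList s2.toList) s1.toList := by
    unfold pvMarkA
    rw [pvMarkA_rec, pvMarkRec_seg s1.toList _ (hG ▸ h11)]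
    simp
  have e2 : (pvMarkA (pvLongestCommonA s1.toList s2.toList) s2.toList).2 =
      pvMarkSeg (pvLongestCommonA s1.toList s2.toList) s2.toList := by
    unfold pvMarkA
    rw [pvMarkA_rec, pvMarkRec_seg s2.toList _ (hG ▸ h12)]
    simp
  rw [e1, e2]
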